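-- pv_equiv track=rewrite | github.com/saipriya-m-ravi/DS_ALGO | Graphs/bfs_in_grid.py | solve
-- ===== SOURCE A (Python) =====
-- from collections import deque
--
-- def solve(A, B, C, D, E, F):
--     grid = [[1] * (B+1) for _ in range(A+1)]
--
--     for i in range(A+1):
--         for j in range(B+1):
--             for k in range(C):
--                 dist = ((E[k]-i)**2 + (F[k]-j)**2)
--                 if dist <= D**2:
--                     grid[i][j] = 0
--                     break
--
--     if not grid[0][0] or not grid[A][B]:
--         return "NO"
--
--     queue = deque([(0,0)])
--     grid[0][0] = -1
--     directions = [(0,1),(1,0),(-1,0),(0,-1),(1,-1),(-1,1),(1,1),(-1,-1)]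
--
--     while queue:
--         x,y = queue.popleft()
--         if x==A and y==B:
--             return "YES"
--         for dx,dy in directions:
--             newx,newy = x+dx, y+dy
--             if 0<=newx<=A and 0<=newy<=B and grid[newx][newy]==1:
--                 queue.append((newx,newy))
--                 grid[newx][newy] = -1
--
--     return "NO"
-- ===== SOURCE B (Python) =====
-- def solve(A, B, C, D, E, F):
--     # Mark blocked cells per circle over its clipped bounding box (O(C*min(D^2, A*B)))
--     # instead of scanning every circle for every cell; then BFS with a blocked/visited
--     # set and an index-pointer list instead of a sentinel matrix and a deque.
--     r = abs(D)
--     blocked = set()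
--     for k in range(C):
--         ex, ey = E[k], F[k]
--         if max(ex ** 2, (ex - A) ** 2) + max(ey ** 2, (ey - B) ** 2) <= D * D:
--             # this circle alone covers every grid corner, hence every cell: start is blocked
--             return "NO"
--         for x in range(max(0, ex - r), min(A, ex + r) + 1):
--             for y in range(max(0, ey - r), min(B, ey + r) + 1):
--                 if (ex - x) ** 2 + (ey - y) ** 2 <= D * D:
--                     blocked.add((x, y))
--     if (0, 0) in blocked or (A, B) in blocked:
--         return "NO"
--     order = [(0, 0)]
--     visited = {(0, 0)}
--     i = 0
--     while i < len(order):
--         x, y = order[i]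
--         i += 1
--         if x == A and y == B:
--             return "YES"
--         for dx, dy in ((0, 1), (1, 0), (-1, 0), (0, -1), (1, -1), (-1, 1), (1, 1), (-1, -1)):
--             nx, ny = x + dx, y + dy
--             if 0 <= nx <= A and 0 <= ny <= B and (nx, ny) not in blocked and (nx, ny) not in visited:
--                 visited.add((nx, ny))
--                 order.append((nx, ny))
--     return "NO"
-- ===== Notes on version B (the rewrite author's own statement) =====
-- stated objective: faster
-- what changed: Obstacles are marked per circle over its clipped bounding box (instead of scanning all C circles for every one of the (A+1)*(B+1) cells), and the BFS keeps a blocked set plus a visited set with an index-pointer list instead of mutating a sentinel matrix popped through a deque.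
-- outside the precondition, e.g. on solve(9, 9, 10, 7, [10, 1, 10, -1, 9], [7, 1, 2, 10, 7]): A returns 'NO', B raises IndexError
import Mathlib
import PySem

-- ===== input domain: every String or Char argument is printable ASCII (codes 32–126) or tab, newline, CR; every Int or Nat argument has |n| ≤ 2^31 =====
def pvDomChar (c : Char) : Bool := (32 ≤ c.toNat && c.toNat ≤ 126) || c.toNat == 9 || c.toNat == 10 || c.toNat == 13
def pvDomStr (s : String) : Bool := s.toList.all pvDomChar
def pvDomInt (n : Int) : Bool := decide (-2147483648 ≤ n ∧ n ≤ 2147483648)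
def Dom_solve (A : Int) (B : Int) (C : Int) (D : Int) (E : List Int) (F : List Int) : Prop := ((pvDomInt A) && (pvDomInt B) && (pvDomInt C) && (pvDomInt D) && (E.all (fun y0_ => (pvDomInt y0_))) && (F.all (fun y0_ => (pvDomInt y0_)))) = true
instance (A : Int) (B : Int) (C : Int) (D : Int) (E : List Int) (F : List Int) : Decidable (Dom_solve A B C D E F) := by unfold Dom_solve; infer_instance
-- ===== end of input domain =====

-- B marks obstacles per circle over a clipped bounding box and runs the BFS over a
-- blocked/visited set with an index-pointer list, instead of A's per-cell scan of all
-- circles and sentinel-matrix deque BFS (objective: faster).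

-- ===== PORT A =====
def pvDirs : List (Int × Int) := [(0,1),(1,0),(-1,0),(0,-1),(1,-1),(-1,1),(1,1),(-1,-1)]

-- inner 'for k in range(C): … break' of A, per cell (i,j)
def pvCellA (D : Int) (E F : List Int) (i j : Int) : List Int → Int
  | [] => 1
  | k :: ks =>
    if ((PySem.List.pyGetD E k 0) - i)^2 + ((PySem.List.pyGetD F k 0) - j)^2 ≤ D^2 then 0
    else pvCellA D E F i j ks

def pvGridA (A B C D : Int) (E F : List Int) : List (List Int) :=
  (PySem.List.pyRange 0 (A+1) 1).map (fun i =>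
    (PySem.List.pyRange 0 (B+1) 1).map (fun j => pvCellA D E F i j (PySem.List.pyRange 0 C 1)))

def pvGget (g : List (List Int)) (x y : Int) : Int := (g.getD x.toNat []).getD y.toNat 0
def pvGset (g : List (List Int)) (x y v : Int) : List (List Int) :=
  g.set x.toNat ((g.getD x.toNat []).set y.toNat v)

def pvStepA (A B x y : Int) (st : List (List Int) × List (Int × Int)) (d : Int × Int) :
    List (List Int) × List (Int × Int) :=
  let nx := x + d.1
  let ny := y + d.2
  if 0 ≤ nx ∧ nx ≤ A ∧ 0 ≤ ny ∧ ny ≤ B ∧ pvGget st.1 nx ny = 1 then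
    (pvGset st.1 nx ny (-1), st.2 ++ [(nx, ny)])
  else st

def pvBfsA (A B : Int) : Nat → List (List Int) → List (Int × Int) → String
  | 0, _, _ => "NO"
  | Nat.succ _, _, [] => "NO"
  | Nat.succ fuel, g, (x, y) :: rest =>
    if x = A ∧ y = B then "YES"
    else
      let st := pvDirs.foldl (pvStepA A B x y) (g, rest)
      pvBfsA A B fuel st.1 st.2

def solve (A : Int) (B : Int) (C : Int) (D : Int) (E : List Int) (F : List Int) : String :=
  let grid := pvGridA A B C D E F
  if pvGget grid 0 0 = 0 ∨ pvGget grid A B = 0 then "NO"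
  else pvBfsA A B (((A+1)*(B+1)).toNat + 1) (pvGset grid 0 0 (-1)) [(0, 0)]

-- ===== PORT B =====
def pvCircle (A B D : Int) (E F : List Int) (s : PySem.Set (Int × Int)) (k : Int) :
    PySem.Set (Int × Int) :=
  let ex := PySem.List.pyGetD E k 0
  let ey := PySem.List.pyGetD F k 0
  (PySem.List.pyRange (max 0 (ex - |D|)) (min A (ex + |D|) + 1) 1).foldl (fun s x =>
    (PySem.List.pyRange (max 0 (ey - |D|)) (min B (ey + |D|) + 1) 1).foldl (fun s y =>
      if (ex - x)^2 + (ey - y)^2 ≤ D * D then PySem.Set.add s (x, y) else s) s) s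

def pvMark (A B D : Int) (E F : List Int) :
    List Int → PySem.Set (Int × Int) → Option (PySem.Set (Int × Int))
  | [], s => some s
  | k :: ks, s =>
    let ex := PySem.List.pyGetD E k 0
    let ey := PySem.List.pyGetD F k 0
    if max (ex^2) ((ex - A)^2) + max (ey^2) ((ey - B)^2) ≤ D * D then none
    else pvMark A B D E F ks (pvCircle A B D E F s k)

def pvStepB (A B x y : Int) (bl : PySem.Set (Int × Int))
    (st : PySem.Set (Int × Int) × List (Int × Int)) (d : Int × Int) :
    PySem.Set (Int × Int) × List (Int × Int) :=
  let nx := x + d.1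
  let ny := y + d.2
  if 0 ≤ nx ∧ nx ≤ A ∧ 0 ≤ ny ∧ ny ≤ B ∧ (nx, ny) ∉ bl ∧ (nx, ny) ∉ st.1 then
    (PySem.Set.add st.1 (nx, ny), st.2 ++ [(nx, ny)])
  else st

def pvBfsB (A B : Int) (bl : PySem.Set (Int × Int)) :
    Nat → PySem.Set (Int × Int) → List (Int × Int) → Nat → String
  | 0, _, _, _ => "NO"
  | Nat.succ fuel, vis, order, i =>
    if i < order.length then
      let c := order.getD i (0, 0)
      if c.1 = A ∧ c.2 = B then "YES"
      else
        let st := pvDirs.foldl (pvStepB A B c.1 c.2 bl) (vis, order)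
        pvBfsB A B bl fuel st.1 st.2 (i + 1)
    else "NO"

def solve_alt (A : Int) (B : Int) (C : Int) (D : Int) (E : List Int) (F : List Int) : String :=
  match pvMark A B D E F (PySem.List.pyRange 0 C 1) PySem.Set.empty with
  | none => "NO"
  | some bl =>
    if ((0 : Int), (0 : Int)) ∈ bl ∨ (A, B) ∈ bl then "NO"
    else pvBfsB A B bl (((A+1)*(B+1)).toNat + 1) (PySem.Set.ofList [((0 : Int), (0 : Int))]) [(0, 0)] 0

-- ===== PRECONDITION & SPEC =====
-- A raises IndexError when A < 0 or B < 0 (grid[0][0]/grid[A][B] on an empty grid) and it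
-- reads E[k]/F[k] for k < C, so Pre_ excludes C > len(E) and C > len(F); on a few such inputs
-- A still returns (every cell's scan breaks before reaching the missing index) while B's
-- per-circle pass raises there.
def Pre_solve (A : Int) (B : Int) (C : Int) (D : Int) (E : List Int) (F : List Int) : Prop :=
  0 ≤ A ∧ 0 ≤ B ∧ C ≤ (E.length : Int) ∧ C ≤ (F.length : Int)
instance (A : Int) (B : Int) (C : Int) (D : Int) (E : List Int) (F : List Int) : Decidable (Pre_solve A B C D E F) := by unfold Pre_solve; infer_instance

def pvWitness_solve : Int × Int × Int × Int × List Int × List Int := (1, 1, 1, 1, [1], [1])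

def Spec_solve (A : Int) (B : Int) (C : Int) (D : Int) (E : List Int) (F : List Int) (out : String) : Prop := out = solve_alt A B C D E F
instance (A : Int) (B : Int) (C : Int) (D : Int) (E : List Int) (F : List Int) (out : String) : Decidable (Spec_solve A B C D E F out) := by unfold Spec_solve; infer_instance

-- ===== CLAIM (what is proved, stated in full; the proofs are below) =====
def Claim_equal_solve : Prop := ∀ (A : Int) (B : Int) (C : Int) (D : Int) (E : List Int) (F : List Int), Dom_solve A B C D E F → Pre_solve A B C D E F → Spec_solve A B C D E F (solve A B C D E F)
-- ===== LEMMAS AND PROOFS =====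

-- (x,y) is an in-bounds cell
def pvInb (A B x y : Int) : Prop := 0 ≤ x ∧ x ≤ A ∧ 0 ≤ y ∧ y ≤ B

-- the value A's matrix holds for a cell, in terms of B's two sets
def pvEnc (bl vis : List (Int × Int)) (x y : Int) : Int :=
  if (x, y) ∈ bl then 0 else if (x, y) ∈ vis then -1 else 1

def pvShape (A B : Int) (g : List (List Int)) : Prop :=
  g.length = (A+1).toNat ∧ ∀ row ∈ g, row.length = (B+1).toNat

-- state relation between A's BFS state (matrix) and B's (visited set)
def pvRel (A B : Int) (bl : List (Int × Int)) (g : List (List Int)) (vis : List (Int × Int)) : Prop :=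
  pvShape A B g ∧ ∀ x y, pvInb A B x y → pvGget g x y = pvEnc bl vis x y

theorem pv_row_len (A B : Int) (g : List (List Int)) (x : Int) (hs : pvShape A B g)
    (h : x.toNat < g.length) : (g.getD x.toNat []).length = (B+1).toNat := by
  have hm : g[x.toNat] ∈ g := List.getElem_mem h
  have := hs.2 _ hm
  simpa [List.getD, List.getElem?_eq_getElem h] using this

theorem pv_shape_gset (A B : Int) (g : List (List Int)) (x y v : Int) (hs : pvShape A B g)
    (hx : pvInb A B x y) : pvShape A B (pvGset g x y v) := by
  obtain ⟨ha, hb, hc, hd⟩ := hx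
  have hxlt : x.toNat < g.length := by rw [hs.1]; omega
  refine ⟨by simp [pvGset, hs.1], ?_⟩
  intro row hrow
  rcases List.mem_or_eq_of_mem_set hrow with hm | rfl
  · exact hs.2 _ hm
  · simpa using pv_row_len A B g x hs hxlt

theorem pv_gget_gset_same (A B : Int) (g : List (List Int)) (x y v : Int)
    (hs : pvShape A B g) (hx : pvInb A B x y) : pvGget (pvGset g x y v) x y = v := by
  obtain ⟨ha, hb, hc, hd⟩ := hx
  have hxlt : x.toNat < g.length := by rw [hs.1]; omega
  have hylt : y.toNat < (g.getD x.toNat []).length := by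
    rw [pv_row_len A B g x hs hxlt]; omega
  simp [pvGget, pvGset, List.getD, List.getElem?_set_self hxlt,
    List.getElem?_set_self (by simpa using hylt)]

theorem pv_gget_gset_ne (A B : Int) (g : List (List Int)) (x y v a b : Int)
    (hs : pvShape A B g) (hx : pvInb A B x y) (ha : pvInb A B a b) (hne : ¬(a = x ∧ b = y)) :
    pvGget (pvGset g x y v) a b = pvGget g a b := by
  obtain ⟨h1, h2, h3, h4⟩ := hx
  obtain ⟨h5, h6, h7, h8⟩ := ha
  by_cases hax : a = x
  · subst hax
    have hby : b.toNat ≠ y.toNat := fun h => hne ⟨rfl, by omega⟩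
    have hlt : a.toNat < g.length := by rw [hs.1]; omega
    simp [pvGget, pvGset, List.getD, List.getElem?_set_self hlt, List.getElem?_set_ne (Ne.symm hby)]
  · have : x.toNat ≠ a.toNat := by omega
    simp [pvGget, pvGset, List.getD, List.getElem?_set_ne this]

theorem pv_mem_foldl {α β : Type} [DecidableEq α] (step : PySem.Set α → β → PySem.Set α)
    (Q : β → α → Prop) (hstep : ∀ s e a, a ∈ step s e ↔ a ∈ s ∨ Q e a) :
    ∀ (l : List β) (s : PySem.Set α) (a : α), a ∈ l.foldl step s ↔ a ∈ s ∨ ∃ e ∈ l, Q e a := by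
  intro l
  induction l with
  | nil => simp
  | cons e t ih =>
    intro s a
    simp only [List.foldl_cons, ih, hstep]
    constructor
    · rintro ((h | h) | ⟨e', he', hq⟩)
      · exact Or.inl h
      · exact Or.inr ⟨e, by simp, h⟩
      · exact Or.inr ⟨e', by simp [he'], hq⟩
    · rintro (h | ⟨e', he', hq⟩)
      · exact Or.inl (Or.inl h)
      · rcases List.mem_cons.mp he' with rfl | h'
        · exact Or.inl (Or.inr hq)
        · exact Or.inr ⟨e', h', hq⟩

theorem pv_mem_circle (A B D : Int) (E F : List Int) (s : PySem.Set (Int × Int)) (k : Int)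
    (a : Int × Int) :
    a ∈ pvCircle A B D E F s k ↔ a ∈ s ∨
      ∃ x' ∈ PySem.List.pyRange (max 0 (PySem.List.pyGetD E k 0 - |D|)) (min A (PySem.List.pyGetD E k 0 + |D|) + 1) 1,
        ∃ y' ∈ PySem.List.pyRange (max 0 (PySem.List.pyGetD F k 0 - |D|)) (min B (PySem.List.pyGetD F k 0 + |D|) + 1) 1,
          (PySem.List.pyGetD E k 0 - x')^2 + (PySem.List.pyGetD F k 0 - y')^2 ≤ D * D ∧ a = (x', y') := by
  have hin : ∀ (ex ey : Int) (s : PySem.Set (Int × Int)) (x' : Int) (a : Int × Int),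
      a ∈ (PySem.List.pyRange (max 0 (ey - |D|)) (min B (ey + |D|) + 1) 1).foldl (fun s y =>
        if (ex - x')^2 + (ey - y)^2 ≤ D * D then PySem.Set.add s (x', y) else s) s ↔
      a ∈ s ∨ ∃ y' ∈ PySem.List.pyRange (max 0 (ey - |D|)) (min B (ey + |D|) + 1) 1,
        (ex - x')^2 + (ey - y')^2 ≤ D * D ∧ a = (x', y') := by
    intro ex ey s x' a
    refine pv_mem_foldl _ (fun y' a => (ex - x')^2 + (ey - y')^2 ≤ D * D ∧ a = (x', y')) ?_ _ s a
    intro s e a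
    by_cases h : (ex - x')^2 + (ey - e)^2 ≤ D * D
    · simp [h, PySem.Set.mem_add]
    · simp only [if_neg h]
      constructor
      · intro hm; exact Or.inl hm
      · rintro (hm | ⟨hc, _⟩)
        · exact hm
        · exact absurd hc h
  exact pv_mem_foldl _
    (fun x' a => ∃ y' ∈ _, _ ∧ a = (x', y'))
    (fun s e a => hin (PySem.List.pyGetD E k 0) (PySem.List.pyGetD F k 0) s e a) _ s a

theorem pv_mem_mark (A B D : Int) (E F : List Int) :
    ∀ (ks : List Int) (s bl : PySem.Set (Int × Int)), pvMark A B D E F ks s = some bl →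
      ∀ a : Int × Int, a ∈ bl ↔ a ∈ s ∨
        ∃ k ∈ ks,
          (max 0 (PySem.List.pyGetD E k 0 - |D|) ≤ a.1 ∧ a.1 < min A (PySem.List.pyGetD E k 0 + |D|) + 1) ∧
          (max 0 (PySem.List.pyGetD F k 0 - |D|) ≤ a.2 ∧ a.2 < min B (PySem.List.pyGetD F k 0 + |D|) + 1) ∧
          (PySem.List.pyGetD E k 0 - a.1)^2 + (PySem.List.pyGetD F k 0 - a.2)^2 ≤ D * D := by
  intro ks
  induction ks with
  | nil =>
    intro s bl h a
    simp only [pvMark] at h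
    cases h
    simp
  | cons k t ih =>
    intro s bl h a
    simp only [pvMark] at h
    by_cases hcov : max ((PySem.List.pyGetD E k 0)^2) ((PySem.List.pyGetD E k 0 - A)^2) +
        max ((PySem.List.pyGetD F k 0)^2) ((PySem.List.pyGetD F k 0 - B)^2) ≤ D * D
    · rw [if_pos hcov] at h; exact absurd h (by simp)
    · rw [if_neg hcov] at h
      rw [ih _ _ h a, pv_mem_circle]
      simp only [PySem.List.mem_pyRange_one]
      constructor
      · rintro ((hs | ⟨x', ⟨hx1, hx2⟩, y', ⟨hy1, hy2⟩, hc, rfl⟩) | ⟨k', hk', hrest⟩)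
        · exact Or.inl hs
        · exact Or.inr ⟨k, List.mem_cons_self, ⟨hx1, hx2⟩, ⟨hy1, hy2⟩, hc⟩
        · exact Or.inr ⟨k', List.mem_cons_of_mem _ hk', hrest⟩
      · rintro (hs | ⟨k', hk', hb1, hb2, hc⟩)
        · exact Or.inl (Or.inl hs)
        · rcases List.mem_cons.mp hk' with rfl | hk'
          · refine Or.inl (Or.inr ⟨a.1, ⟨hb1.1, hb1.2⟩, a.2, ⟨hb2.1, hb2.2⟩, hc, rfl⟩)
          · exact Or.inr ⟨k', hk', hb1, hb2, hc⟩

theorem pv_mark_none (A B D : Int) (E F : List Int) :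
    ∀ (ks : List Int) (s : PySem.Set (Int × Int)), pvMark A B D E F ks s = none →
      ∃ k ∈ ks, max ((PySem.List.pyGetD E k 0)^2) ((PySem.List.pyGetD E k 0 - A)^2) +
        max ((PySem.List.pyGetD F k 0)^2) ((PySem.List.pyGetD F k 0 - B)^2) ≤ D * D := by
  intro ks
  induction ks with
  | nil => intro s h; simp [pvMark] at h
  | cons k t ih =>
    intro s h
    simp only [pvMark] at h
    by_cases hcov : max ((PySem.List.pyGetD E k 0)^2) ((PySem.List.pyGetD E k 0 - A)^2) +
        max ((PySem.List.pyGetD F k 0)^2) ((PySem.List.pyGetD F k 0 - B)^2) ≤ D * D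
    · exact ⟨k, List.mem_cons_self, hcov⟩
    · rw [if_neg hcov] at h
      obtain ⟨k', hk', hc⟩ := ih _ h
      exact ⟨k', List.mem_cons_of_mem _ hk', hc⟩


theorem pv_cellA_eq (D : Int) (E F : List Int) (i j : Int) (ks : List Int) :
    pvCellA D E F i j ks =
      if ∃ k ∈ ks, ((PySem.List.pyGetD E k 0) - i)^2 + ((PySem.List.pyGetD F k 0) - j)^2 ≤ D^2 then 0 else 1 := by
  induction ks with
  | nil => simp [pvCellA]
  | cons k t ih =>
    simp only [pvCellA, ih]
    by_cases h : ((PySem.List.pyGetD E k 0) - i)^2 + ((PySem.List.pyGetD F k 0) - j)^2 ≤ D^2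
    · simp [h]
    · simp [h]

theorem pv_cond_iff (A B C D : Int) (E F : List Int) (x y : Int)
    (h1 : 0 ≤ x) (h2 : x ≤ A) (h3 : 0 ≤ y) (h4 : y ≤ B) (bl : PySem.Set (Int × Int))
    (hm : pvMark A B D E F (PySem.List.pyRange 0 C 1) PySem.Set.empty = some bl) :
    ((x, y) ∈ bl ↔
      ∃ k ∈ PySem.List.pyRange 0 C 1,
        ((PySem.List.pyGetD E k 0) - x)^2 + ((PySem.List.pyGetD F k 0) - y)^2 ≤ D^2) := by
  rw [pv_mem_mark A B D E F _ _ _ hm (x, y)]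
  simp only [PySem.Set.empty, List.not_mem_nil, false_or]
  constructor
  · rintro ⟨k, hk, _, _, hc⟩
    exact ⟨k, hk, by nlinarith⟩
  · rintro ⟨k, hk, hc⟩
    set ex := PySem.List.pyGetD E k 0
    set ey := PySem.List.pyGetD F k 0
    have hx' : ex - |D| ≤ x ∧ x ≤ ex + |D| := by
      constructor <;> nlinarith [sq_abs D, abs_nonneg D, sq_nonneg ((ex - x) - |D|),
        sq_nonneg ((ex - x) + |D|), sq_nonneg (ey - y)]
    have hy' : ey - |D| ≤ y ∧ y ≤ ey + |D| := by
      constructor <;> nlinarith [sq_abs D, abs_nonneg D, sq_nonneg ((ey - y) - |D|),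
        sq_nonneg ((ey - y) + |D|), sq_nonneg (ex - x)]
    exact ⟨k, hk, ⟨by omega, by omega⟩, ⟨by omega, by omega⟩, by nlinarith⟩

theorem pv_shape_gridA (A B C D : Int) (E F : List Int) : pvShape A B (pvGridA A B C D E F) := by
  constructor
  · simp [pvGridA, PySem.List.length_pyRange_one]
  · intro row hrow
    simp only [pvGridA, List.mem_map] at hrow
    obtain ⟨i, _, rfl⟩ := hrow
    simp [PySem.List.length_pyRange_one]

-- gget of the freshly built grid is the per-cell scan

theorem pv_gget_gridA (A B C D : Int) (E F : List Int) (x y : Int) (h : pvInb A B x y) :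
    pvGget (pvGridA A B C D E F) x y = pvCellA D E F x y (PySem.List.pyRange 0 C 1) := by
  obtain ⟨h1, h2, h3, h4⟩ := h
  have hx : x.toNat < ((A:Int)+1-0).toNat := by omega
  have hy : y.toNat < ((B:Int)+1-0).toNat := by omega
  simp only [pvGget, pvGridA, PySem.List.pyRange_one, List.map_map, List.getD,
    List.getElem?_map, List.getElem?_range hx, List.getElem?_range hy,
    Option.map_some, Option.getD_some, Function.comp]
  congr 1 <;> omega

theorem pv_fold_step (A B : Int) (bl : List (Int × Int)) (x y : Int) (dirs : List (Int × Int)) :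
    ∀ (g : List (List Int)) (vis order : List (Int × Int)) (i : Nat),
      pvRel A B bl g vis → i ≤ order.length →
      pvRel A B bl (dirs.foldl (pvStepA A B x y) (g, order.drop i)).1
        (dirs.foldl (pvStepB A B x y bl) (vis, order)).1 ∧
      (dirs.foldl (pvStepA A B x y) (g, order.drop i)).2 =
        (dirs.foldl (pvStepB A B x y bl) (vis, order)).2.drop i ∧
      i ≤ (dirs.foldl (pvStepB A B x y bl) (vis, order)).2.length := by
  induction dirs with
  | nil => intro g vis order i hrel hi; exact ⟨hrel, rfl, hi⟩
  | cons d ds ih =>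
    intro g vis order i hrel hi
    simp only [List.foldl_cons]
    by_cases hc : 0 ≤ x + d.1 ∧ x + d.1 ≤ A ∧ 0 ≤ y + d.2 ∧ y + d.2 ≤ B ∧
        (x + d.1, y + d.2) ∉ bl ∧ (x + d.1, y + d.2) ∉ vis
    · have hinb : pvInb A B (x + d.1) (y + d.2) := ⟨hc.1, hc.2.1, hc.2.2.1, hc.2.2.2.1⟩
      have hgv : pvGget g (x + d.1) (y + d.2) = 1 := by
        rw [hrel.2 _ _ hinb, pvEnc, if_neg hc.2.2.2.2.1, if_neg hc.2.2.2.2.2]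
      have hA : pvStepA A B x y (g, order.drop i) d =
          (pvGset g (x + d.1) (y + d.2) (-1), order.drop i ++ [(x + d.1, y + d.2)]) := by
        rw [pvStepA]
        exact if_pos ⟨hc.1, hc.2.1, hc.2.2.1, hc.2.2.2.1, hgv⟩
      have hB : pvStepB A B x y bl (vis, order) d =
          (PySem.Set.add vis (x + d.1, y + d.2), order ++ [(x + d.1, y + d.2)]) := by
        rw [pvStepB]
        exact if_pos hc
      rw [hA, hB]
      have hrel' : pvRel A B bl (pvGset g (x + d.1) (y + d.2) (-1))
          (PySem.Set.add vis (x + d.1, y + d.2)) := by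
        refine ⟨pv_shape_gset A B g _ _ (-1) hrel.1 hinb, ?_⟩
        intro a b hab
        by_cases heq : a = x + d.1 ∧ b = y + d.2
        · obtain ⟨rfl, rfl⟩ := heq
          rw [pv_gget_gset_same A B g _ _ (-1) hrel.1 hinb]
          simp [pvEnc, PySem.Set.mem_add, hc.2.2.2.2.1]
        · rw [pv_gget_gset_ne A B g _ _ (-1) a b hrel.1 hinb hab heq, hrel.2 a b hab]
          have hne : ¬ (a, b) = (x + d.1, y + d.2) := by
            intro h
            exact heq ⟨congrArg Prod.fst h, congrArg Prod.snd h⟩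
          simp only [pvEnc, PySem.Set.mem_add, hne, or_false]
      have hlen : i ≤ (order ++ [(x + d.1, y + d.2)]).length := by
        simp; omega
      have hres := ih (pvGset g (x + d.1) (y + d.2) (-1))
        (PySem.Set.add vis (x + d.1, y + d.2)) (order ++ [(x + d.1, y + d.2)]) i hrel' hlen
      rw [List.drop_append_of_le_length hi] at hres
      exact hres
    · have hA : pvStepA A B x y (g, order.drop i) d = (g, order.drop i) := by
        rw [pvStepA]
        refine if_neg ?_
        intro h
        apply hc
        refine ⟨h.1, h.2.1, h.2.2.1, h.2.2.2.1, ?_, ?_⟩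
        · intro hmem
          have hv := hrel.2 _ _ ⟨h.1, h.2.1, h.2.2.1, h.2.2.2.1⟩
          rw [h.2.2.2.2] at hv
          rw [pvEnc, if_pos hmem] at hv; omega
        · intro hmem
          have hv := hrel.2 _ _ ⟨h.1, h.2.1, h.2.2.1, h.2.2.2.1⟩
          rw [h.2.2.2.2] at hv
          rw [pvEnc] at hv
          by_cases hbl : (x + d.1, y + d.2) ∈ bl
          · rw [if_pos hbl] at hv; omega
          · rw [if_neg hbl, if_pos hmem] at hv; omega
      have hB : pvStepB A B x y bl (vis, order) d = (vis, order) := by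
        rw [pvStepB]
        exact if_neg hc
      rw [hA, hB]
      exact ih g vis order i hrel hi

theorem pv_bfs_eq (A B : Int) (bl : List (Int × Int)) :
    ∀ (fuel : Nat) (g : List (List Int)) (vis order : List (Int × Int)) (i : Nat),
      pvRel A B bl g vis → i ≤ order.length →
      pvBfsA A B fuel g (order.drop i) = pvBfsB A B bl fuel vis order i := by
  intro fuel
  induction fuel with
  | zero => intro g vis order i _ _; rfl
  | succ fuel ih =>
    intro g vis order i hrel hi
    by_cases hlt : i < order.length
    · have hdrop : order.drop i = order[i] :: order.drop (i + 1) :=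
        (List.getElem_cons_drop hlt).symm
      have hgetD : order.getD i (0, 0) = order[i] := List.getD_eq_getElem order (0,0) hlt
      rcases hxy : order[i] with ⟨x, y⟩
      rw [hdrop, hxy]
      rw [show pvBfsA A B (fuel + 1) g ((x, y) :: order.drop (i + 1)) =
          (if x = A ∧ y = B then "YES"
           else
             pvBfsA A B fuel ((pvDirs.foldl (pvStepA A B x y) (g, order.drop (i + 1))).1)
               ((pvDirs.foldl (pvStepA A B x y) (g, order.drop (i + 1))).2)) from rfl]
      rw [show pvBfsB A B bl (fuel + 1) vis order i =
          (if i < order.length then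
            if (order.getD i (0, 0)).1 = A ∧ (order.getD i (0, 0)).2 = B then "YES"
            else
              pvBfsB A B bl fuel
                ((pvDirs.foldl (pvStepB A B (order.getD i (0, 0)).1 (order.getD i (0, 0)).2 bl) (vis, order)).1)
                ((pvDirs.foldl (pvStepB A B (order.getD i (0, 0)).1 (order.getD i (0, 0)).2 bl) (vis, order)).2) (i + 1)
          else "NO") from rfl]
      rw [if_pos hlt, hgetD, hxy]
      by_cases htgt : x = A ∧ y = B
      · rw [if_pos htgt, if_pos htgt]
      · rw [if_neg htgt, if_neg htgt]
        have hstep := pv_fold_step A B bl x y pvDirs g vis order (i + 1) hrel (by omega)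
        rw [hstep.2.1]
        exact ih _ _ _ _ hstep.1 hstep.2.2
    · have hdrop : order.drop i = [] := List.drop_eq_nil_of_le (by omega)
      rw [hdrop]
      simp [pvBfsA, pvBfsB, hlt]

-- ===== VERDICT (by name: the statement is the Claim_ definition above) =====
theorem solve_spec : Claim_equal_solve := by
  unfold Claim_equal_solve
  intro A B C D E F _ hpre
  obtain ⟨hA, hB, _, _⟩ := hpre
  unfold Spec_solve solve solve_alt
  have hinb00 : pvInb A B 0 0 := ⟨le_refl _, hA, le_refl _, hB⟩
  have hinbAB : pvInb A B A B := ⟨hA, le_refl _, hB, le_refl _⟩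
  have hgrid : ∀ a b, pvInb A B a b →
      pvGget (pvGridA A B C D E F) a b =
        if ∃ k ∈ PySem.List.pyRange 0 C 1,
            ((PySem.List.pyGetD E k 0) - a)^2 + ((PySem.List.pyGetD F k 0) - b)^2 ≤ D^2
        then 0 else 1 := by
    intro a b hab
    rw [pv_gget_gridA A B C D E F a b hab, pv_cellA_eq]
  cases hmark : pvMark A B D E F (PySem.List.pyRange 0 C 1) PySem.Set.empty with
  | none =>
    obtain ⟨k, hk, hcov⟩ := pv_mark_none A B D E F _ _ hmark
    have h00 : pvGget (pvGridA A B C D E F) 0 0 = 0 := by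
      rw [hgrid 0 0 hinb00, if_pos ?_]
      refine ⟨k, hk, ?_⟩
      have e1 : (PySem.List.pyGetD E k 0)^2 ≤
          max ((PySem.List.pyGetD E k 0)^2) ((PySem.List.pyGetD E k 0 - A)^2) := le_max_left _ _
      have e2 : (PySem.List.pyGetD F k 0)^2 ≤
          max ((PySem.List.pyGetD F k 0)^2) ((PySem.List.pyGetD F k 0 - B)^2) := le_max_left _ _
      nlinarith
    rw [if_pos (Or.inl h00)]
  | some bl =>
    show _ = if ((0:Int), (0:Int)) ∈ bl ∨ (A, B) ∈ bl then "NO"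
      else pvBfsB A B bl (((A+1)*(B+1)).toNat + 1) (PySem.Set.ofList [((0:Int), (0:Int))]) [(0, 0)] 0
    have hgridbl : ∀ a b, pvInb A B a b →
        pvGget (pvGridA A B C D E F) a b = if (a, b) ∈ bl then 0 else 1 := by
      intro a b hab
      rw [hgrid a b hab,
        if_congr (Iff.symm (pv_cond_iff A B C D E F a b hab.1 hab.2.1 hab.2.2.1 hab.2.2.2 bl hmark)) rfl rfl]
    by_cases hblk : ((0:Int), (0:Int)) ∈ bl ∨ (A, B) ∈ bl
    · rw [if_pos ?_, if_pos hblk]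
      rcases hblk with h | h
      · exact Or.inl (by rw [hgridbl 0 0 hinb00, if_pos h])
      · exact Or.inr (by rw [hgridbl A B hinbAB, if_pos h])
    · rw [not_or] at hblk
      rw [if_neg ?_, if_neg (by tauto)]
      · have hvis0 : PySem.Set.ofList [((0:Int), (0:Int))] = [((0:Int), (0:Int))] := rfl
        rw [hvis0]
        have hrel : pvRel A B bl
            (pvGset (pvGridA A B C D E F) 0 0 (-1)) [((0:Int), (0:Int))] := by
          refine ⟨pv_shape_gset A B _ 0 0 (-1) (pv_shape_gridA A B C D E F) hinb00, ?_⟩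
          intro a b hab
          by_cases heq : a = 0 ∧ b = 0
          · obtain ⟨rfl, rfl⟩ := heq
            rw [pv_gget_gset_same A B _ 0 0 (-1) (pv_shape_gridA A B C D E F) hinb00]
            simp [pvEnc, hblk.1]
          · rw [pv_gget_gset_ne A B _ 0 0 (-1) a b (pv_shape_gridA A B C D E F) hinb00 hab heq,
              hgridbl a b hab]
            have hne : ¬ (a, b) = ((0:Int), (0:Int)) := by
              intro h
              exact heq ⟨congrArg Prod.fst h, congrArg Prod.snd h⟩
            simp only [pvEnc, List.mem_singleton, hne, if_false]
        have := pv_bfs_eq A B bl (((A+1)*(B+1)).toNat + 1)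
          (pvGset (pvGridA A B C D E F) 0 0 (-1)) [((0:Int), (0:Int))] [((0:Int), (0:Int))] 0
          hrel (by simp)
        simpa using this
      · intro h
        rcases h with h | h
        · rw [hgridbl 0 0 hinb00] at h
          by_cases hm : ((0:Int), (0:Int)) ∈ bl
          · exact hblk.1 hm
          · rw [if_neg hm] at h; omega
        · rw [hgridbl A B hinbAB] at h
          by_cases hm : (A, B) ∈ bl
          · exact hblk.2 hm
          · rw [if_neg hm] at h; omega
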